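-- pv_equiv track=rewrite | github.com/modflowai/flopy-expert | test_review/scripts/update_metadata_model_version.py | determine_model_version
-- ===== SOURCE A (Python) =====
-- def determine_model_version(metadata):
--     """
--     Determine MODFLOW version based on packages used.
--     """
--     packages = metadata.get('packages', [])
--     package_names = [p.get('package', '') for p in packages]
--     package_files = [p.get('file', '') for p in packages]
--
--     # Check for MF6 packages
--     if any('flopy.mf6' in f for f in package_files):
--         return 'mf6'
--
--     # Check for MFNWT-specific packages
--     if any('NWT' in p for p in package_names):
--         return 'mfnwt'
--
--     # Check for MFUSG-specific packages
--     if any(p in ['DISU', 'SMS'] for p in package_names):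
--         return 'mfusg'
--
--     # Check for MF2005/MF2000 packages
--     if any('flopy.modflow' in f for f in package_files):
--         # More specific checks
--         if 'UPW' in package_names:
--             return 'mfnwt'  # UPW is typically MFNWT
--         elif 'LPF' in package_names or 'BCF' in package_names:
--             return 'mf2005'  # Default to MF2005 for standard packages
--         else:
--             return 'mf2005'
--
--     # Default to mf2005 if unclear
--     return 'mf2005'
-- ===== SOURCE B (Python) =====
-- def determine_model_version(metadata):
--     """
--     Determine MODFLOW version based on packages used.
--     """
--     packages = metadata.get('packages', [])
--
--     def rank(p):
--         name = p.get('package', '')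
--         file = p.get('file', '')
--         if 'flopy.mf6' in file:
--             return 4
--         if 'NWT' in name:
--             return 3
--         if name in ('DISU', 'SMS'):
--             return 2
--         if 'flopy.modflow' in file:
--             return 1
--         return 0
--
--     best = max((rank(p) for p in packages), default=0)
--     if best == 4:
--         return 'mf6'
--     if best == 3:
--         return 'mfnwt'
--     if best == 2:
--         return 'mfusg'
--     if best == 1 and any(p.get('package', '') == 'UPW' for p in packages):
--         return 'mfnwt'
--     return 'mf2005'
-- ===== Notes on version B (the rewrite author's own statement) =====
-- stated objective: alternative
-- what changed: Replaces A's staged any()-scans over pre-built name/file lists by a max-reduction: each package is mapped to a priority rank (mf6=4, NWT=3, DISU/SMS=2, modflow=1), the maximum rank is taken in one reduction, and the version is read off from that rank, with a UPW scan only in the rank-1 case.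
import Mathlib
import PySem

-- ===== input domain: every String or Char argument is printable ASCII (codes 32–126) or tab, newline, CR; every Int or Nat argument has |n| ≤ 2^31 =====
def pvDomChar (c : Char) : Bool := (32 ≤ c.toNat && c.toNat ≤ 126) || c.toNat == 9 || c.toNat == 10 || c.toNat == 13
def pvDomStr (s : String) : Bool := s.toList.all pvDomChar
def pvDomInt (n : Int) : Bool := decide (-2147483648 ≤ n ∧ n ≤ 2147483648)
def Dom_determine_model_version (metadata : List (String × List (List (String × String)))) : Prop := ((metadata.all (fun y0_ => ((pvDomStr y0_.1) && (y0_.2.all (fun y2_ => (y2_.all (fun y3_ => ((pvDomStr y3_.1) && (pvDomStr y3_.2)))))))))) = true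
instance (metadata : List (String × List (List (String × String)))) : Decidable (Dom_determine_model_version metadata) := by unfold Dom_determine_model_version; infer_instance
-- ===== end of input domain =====

-- B replaces A's staged any()-scans over pre-built name/file lists by a max-reduction over
-- per-package priority ranks, reading the version off the maximum rank (objective: alternative).


-- ===== PORT A =====
def determine_model_version (metadata : List (String × List (List (String × String)))) : String :=
  let packages := PySem.Dict.getD (PySem.Dict.mk metadata) "packages" []
  let package_names := packages.map (fun p => PySem.Dict.getD (PySem.Dict.mk p) "package" "")
  let package_files := packages.map (fun p => PySem.Dict.getD (PySem.Dict.mk p) "file" "")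
  if package_files.any (fun f => PySem.Str.isIn "flopy.mf6" f) then "mf6"
  else if package_names.any (fun p => PySem.Str.isIn "NWT" p) then "mfnwt"
  else if package_names.any (fun p => ["DISU", "SMS"].contains p) then "mfusg"
  else if package_files.any (fun f => PySem.Str.isIn "flopy.modflow" f) then
    if package_names.contains "UPW" then "mfnwt"
    else if package_names.contains "LPF" || package_names.contains "BCF" then "mf2005"
    else "mf2005"
  else "mf2005"

-- ===== PORT B =====
-- Source B's inner `rank`: the priority rank of one package dict
def dmvRank (p : List (String × String)) : Int :=
  let name := PySem.Dict.getD (PySem.Dict.mk p) "package" ""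
  let file := PySem.Dict.getD (PySem.Dict.mk p) "file" ""
  if PySem.Str.isIn "flopy.mf6" file then 4
  else if PySem.Str.isIn "NWT" name then 3
  else if ["DISU", "SMS"].contains name then 2
  else if PySem.Str.isIn "flopy.modflow" file then 1
  else 0

def determine_model_version_alt (metadata : List (String × List (List (String × String)))) : String :=
  let packages := PySem.Dict.getD (PySem.Dict.mk metadata) "packages" []
  -- max(generator, default=0) ported as a fold of `max` over the mapped ranks
  let best := (packages.map dmvRank).foldl max 0
  if best == 4 then "mf6"
  else if best == 3 then "mfnwt"
  else if best == 2 then "mfusg"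
  else if best == 1 && packages.any (fun p => PySem.Dict.getD (PySem.Dict.mk p) "package" "" == "UPW") then "mfnwt"
  else "mf2005"

-- ===== PRECONDITION & SPEC =====
def Spec_determine_model_version (metadata : List (String × List (List (String × String)))) (out : String) : Prop := out = determine_model_version_alt metadata
instance (metadata : List (String × List (List (String × String)))) (out : String) : Decidable (Spec_determine_model_version metadata out) := by unfold Spec_determine_model_version; infer_instance

-- ===== CLAIM (what is proved, stated in full; the proofs are below) =====
def Claim_equal_determine_model_version : Prop := ∀ (metadata : List (String × List (List (String × String)))), Dom_determine_model_version metadata → Spec_determine_model_version metadata (determine_model_version metadata)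

-- ===== LEMMAS AND PROOFS =====

-- proof-only abbreviations for the per-package predicates
def dmvIsMf6 (p : List (String × String)) : Bool :=
  PySem.Str.isIn "flopy.mf6" (PySem.Dict.getD (PySem.Dict.mk p) "file" "")
def dmvIsNwt (p : List (String × String)) : Bool :=
  PySem.Str.isIn "NWT" (PySem.Dict.getD (PySem.Dict.mk p) "package" "")
def dmvIsUsg (p : List (String × String)) : Bool :=
  ["DISU", "SMS"].any (fun y => PySem.Dict.getD (PySem.Dict.mk p) "package" "" == y)
def dmvIsMod (p : List (String × String)) : Bool :=
  PySem.Str.isIn "flopy.modflow" (PySem.Dict.getD (PySem.Dict.mk p) "file" "")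

-- the priority value determined by A's four any-scans
def dmvCascade (ps : List (List (String × String))) : Int :=
  if ps.any dmvIsMf6 then 4
  else if ps.any dmvIsNwt then 3
  else if ps.any dmvIsUsg then 2
  else if ps.any dmvIsMod then 1
  else 0

theorem dmvCascade_bounds (ps : List (List (String × String))) :
    0 ≤ dmvCascade ps ∧ dmvCascade ps ≤ 4 := by
  unfold dmvCascade; split_ifs <;> omega

theorem dmvRank_eq (p : List (String × String)) :
    dmvRank p = if dmvIsMf6 p then 4 else if dmvIsNwt p then 3
      else if dmvIsUsg p then 2 else if dmvIsMod p then 1 else 0 := by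
  unfold dmvRank dmvIsMf6 dmvIsNwt dmvIsUsg dmvIsMod
  simp

theorem dmvCascade_cons (p : List (String × String)) (ps : List (List (String × String))) :
    dmvCascade (p :: ps) = max (dmvRank p) (dmvCascade ps) := by
  rw [dmvRank_eq]
  unfold dmvCascade
  simp only [List.any_cons]
  by_cases hf : dmvIsMf6 p = true <;> by_cases hn : dmvIsNwt p = true <;>
    by_cases hu : dmvIsUsg p = true <;> by_cases hm : dmvIsMod p = true <;>
    simp only [Bool.not_eq_true] at hf hn hu hm <;>
    simp only [hf, hn, hu, hm, Bool.true_or, Bool.false_or, if_true] <;>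
    split_ifs <;> simp_all

theorem dmv_fold_eq (ps : List (List (String × String))) (a : Int) (ha : 0 ≤ a) :
    (ps.map dmvRank).foldl max a = max a (dmvCascade ps) := by
  induction ps generalizing a with
  | nil =>
    simp only [List.map_nil, List.foldl_nil]
    unfold dmvCascade
    simp [max_eq_left ha]
  | cons p ps ih =>
    simp only [List.map_cons, List.foldl_cons]
    rw [ih (max a (dmvRank p)) (le_trans ha (le_max_left _ _)), dmvCascade_cons, max_assoc]

theorem dmv_fold_eq0 (ps : List (List (String × String))) :
    (ps.map dmvRank).foldl max 0 = dmvCascade ps := by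
  rw [dmv_fold_eq ps 0 le_rfl]
  exact max_eq_right (dmvCascade_bounds ps).1

theorem dmvUpw_flip (s : String) :
    (fun p : List (String × String) => s == PySem.Dict.getD (PySem.Dict.mk p) "package" "") =
    (fun p : List (String × String) => PySem.Dict.getD (PySem.Dict.mk p) "package" "" == s) := by
  funext p
  exact Bool.eq_iff_iff.mpr (by simp only [beq_iff_eq]; exact eq_comm)

theorem determine_model_version_spec : Claim_equal_determine_model_version := by
  intro metadata _
  unfold Spec_determine_model_version determine_model_version determine_model_version_alt
  generalize PySem.Dict.getD (PySem.Dict.mk metadata) "packages" [] = ps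
  simp only [List.any_map, Function.comp_def, List.contains_eq_any_beq]
  rw [dmv_fold_eq0]
  simp only [dmvUpw_flip]
  unfold dmvCascade dmvIsMf6 dmvIsNwt dmvIsUsg dmvIsMod
  by_cases h1 : (ps.any fun p => PySem.Str.isIn "flopy.mf6" (PySem.Dict.getD (PySem.Dict.mk p) "file" "")) = true <;>
    by_cases h2 : (ps.any fun p => PySem.Str.isIn "NWT" (PySem.Dict.getD (PySem.Dict.mk p) "package" "")) = true <;>
    by_cases h3 : (ps.any fun p => ["DISU", "SMS"].any fun y => PySem.Dict.getD (PySem.Dict.mk p) "package" "" == y) = true <;>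
    by_cases h4 : (ps.any fun p => PySem.Str.isIn "flopy.modflow" (PySem.Dict.getD (PySem.Dict.mk p) "file" "")) = true <;>
    by_cases h5 : (ps.any fun p => PySem.Dict.getD (PySem.Dict.mk p) "package" "" == "UPW") = true <;>
    simp only [Bool.not_eq_true] at h1 h2 h3 h4 h5 <;>
    simp only [h1, h2, h3, h4, h5] <;>
    simp
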